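-- pv_equiv track=rewrite | github.com/ThiagoCosta06/Desafios-de-Programa-o | Desafio 5.py | possibilities
-- ===== SOURCE A (Python) =====
-- morse = {
--     "": {".": "E", "-": "T", "?": "ET"},
--     "E": {".": "I", "-": "A", "?": "IA"},
--     "T": {".": "N", "-": "M", "?": "NM"},
--     "I": {".": "S", "-": "U", "?": "SU"},
--     "A": {".": "R", "-": "W", "?": "RW"},
--     "N": {".": "D", "-": "K", "?": "DK"},
--     "M": {".": "G", "-": "O", "?": "GO"}
-- }
--
-- def possibilidades(estadoAtual, word):
--     possiveis = morse[estadoAtual][word]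
--     return possiveis
--
-- def possibilities(word: str) -> list[str]:
--     resultado = []
--     estadoAtual = ""
--     #se o codigo morse tem somente um acento("." ou "-" ou "?")
--     if len(word) == 1:
--         estadoAtual = possibilidades(estadoAtual, word[0])
--         for letra in estadoAtual:
--             resultado.append(f"{letra}")
--     #se o codigo morse tem dois acentos("..", "-.", ".-", "??", etc)
--     if len(word) == 2:
--         estadoAtual = possibilidades(estadoAtual, word[0])
--         #para descobrir as palavras finais no nivel 2
--         for nivel2 in estadoAtual:
--             possiveis = possibilidades(nivel2, word[1])
--             for letra in range(len(possiveis)):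
--               resultado.append(f"{possiveis[letra]}")
--     #se o codigo morse tem três acentos("..-", "-.-", "?.?", "???", entre outros)
--     if len(word) == 3:
--         estadoAtual = possibilidades(estadoAtual, word[0])
--         nivel2 = ""
--         #para descobrir as possibilidades no nivel 2 do grafo
--         for letra in estadoAtual:
--             estadoAtual = possibilidades(letra, word[1])
--             nivel2 = nivel2 + estadoAtual
--         #para descobrir as palavras finais no nivel 3
--         for nivel3 in nivel2:
--             estadoAtual = possibilidades(nivel3, word[2])
--             for fim in estadoAtual:
--                 resultado.append(f"{fim}")
--
--     return resultado
-- ===== SOURCE B (Python) =====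
-- # Flat transition table keyed by (state, symbol), expanded by depth-first recursion.
-- TRANS = {
--     ("", "."): "E", ("", "-"): "T", ("", "?"): "ET",
--     ("E", "."): "I", ("E", "-"): "A", ("E", "?"): "IA",
--     ("T", "."): "N", ("T", "-"): "M", ("T", "?"): "NM",
--     ("I", "."): "S", ("I", "-"): "U", ("I", "?"): "SU",
--     ("A", "."): "R", ("A", "-"): "W", ("A", "?"): "RW",
--     ("N", "."): "D", ("N", "-"): "K", ("N", "?"): "DK",
--     ("M", "."): "G", ("M", "-"): "O", ("M", "?"): "GO",
-- }
--
-- def _expand(state, rest):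
--     if not rest:
--         return [state]
--     out = []
--     for nxt in TRANS[(state, rest[0])]:
--         out.extend(_expand(nxt, rest[1:]))
--     return out
--
-- def possibilities(word: str) -> list[str]:
--     if len(word) < 1 or len(word) > 3:
--         return []
--     return _expand("", word)
-- ===== Notes on version B (the rewrite author's own statement) =====
-- stated objective: simpler
-- what changed: Replaced A's three hardcoded length-specific branches and nested loops with a flat (state,symbol)-keyed transition table and one recursive depth-first expansion over the word.
import Mathlib
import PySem

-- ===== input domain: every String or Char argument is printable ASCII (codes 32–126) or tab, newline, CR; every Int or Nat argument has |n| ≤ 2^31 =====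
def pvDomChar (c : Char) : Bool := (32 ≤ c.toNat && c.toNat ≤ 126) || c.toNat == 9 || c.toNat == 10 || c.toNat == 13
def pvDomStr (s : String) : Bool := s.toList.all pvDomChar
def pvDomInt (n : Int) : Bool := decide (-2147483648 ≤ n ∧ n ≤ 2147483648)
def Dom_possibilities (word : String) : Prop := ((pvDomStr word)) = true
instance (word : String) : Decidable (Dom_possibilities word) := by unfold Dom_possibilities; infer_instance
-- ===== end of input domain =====

-- B replaces A's three length-specific branches by a flat (state,symbol) transition table
-- and a recursive depth-first expansion; return value only.

-- ===== PORT A =====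
-- the module-level nested dict `morse` (strings as List Char so the kernel can compute with them)
def morseA : PySem.Dict (List Char) (PySem.Dict (List Char) (List Char)) := PySem.Dict.ofList
  [([], (PySem.Dict.ofList [(['.'], ['E']), (['-'], ['T']), (['?'], ['E', 'T'])])),
   (['E'], (PySem.Dict.ofList [(['.'], ['I']), (['-'], ['A']), (['?'], ['I', 'A'])])),
   (['T'], (PySem.Dict.ofList [(['.'], ['N']), (['-'], ['M']), (['?'], ['N', 'M'])])),
   (['I'], (PySem.Dict.ofList [(['.'], ['S']), (['-'], ['U']), (['?'], ['S', 'U'])])),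
   (['A'], (PySem.Dict.ofList [(['.'], ['R']), (['-'], ['W']), (['?'], ['R', 'W'])])),
   (['N'], (PySem.Dict.ofList [(['.'], ['D']), (['-'], ['K']), (['?'], ['D', 'K'])])),
   (['M'], (PySem.Dict.ofList [(['.'], ['G']), (['-'], ['O']), (['?'], ['G', 'O'])]))]

-- morse[estadoAtual][word]; a missing key is a KeyError in Python (excluded by Pre_), here defaulted to ""
def possibilidades (estadoAtual : List Char) (w : List Char) : List Char :=
  (PySem.Dict.get? (PySem.Dict.getD morseA estadoAtual PySem.Dict.empty) w).getD []

-- A's body on the character list of `word` (three sequential length branches, resultado threaded through);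
-- output strings are carried as List Char and turned into String at the wrapper below
def possA (cs : List Char) : List (List Char) :=
  let resultado : List (List Char) := []
  let resultado :=
    if cs.length = 1 then
      let estadoAtual := possibilidades [] [cs.getD 0 ' ']
      estadoAtual.foldl (fun acc letra => acc ++ [[letra]]) resultado
    else resultado
  let resultado :=
    if cs.length = 2 then
      let estadoAtual := possibilidades [] [cs.getD 0 ' ']
      estadoAtual.foldl (fun acc nivel2 =>
        let possiveis := possibilidades [nivel2] [cs.getD 1 ' ']
        possiveis.foldl (fun acc2 letra => acc2 ++ [[letra]]) acc) resultado
    else resultado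
  let resultado :=
    if cs.length = 3 then
      let estadoAtual := possibilidades [] [cs.getD 0 ' ']
      let nivel2 := estadoAtual.foldl
        (fun acc letra => acc ++ possibilidades [letra] [cs.getD 1 ' ']) []
      nivel2.foldl (fun acc nivel3 =>
        let estado := possibilidades [nivel3] [cs.getD 2 ' ']
        estado.foldl (fun acc2 fim => acc2 ++ [[fim]]) acc) resultado
    else resultado
  resultado

def possibilities (word : String) : List String := (possA word.toList).map String.mk

-- ===== PORT B =====
-- B's flat transition table TRANS keyed by (state, symbol)
def transB : PySem.Dict (List Char × Char) (List Char) := PySem.Dict.ofList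
  [(([], '.'), ['E']), (([], '-'), ['T']), (([], '?'), ['E', 'T']),
   ((['E'], '.'), ['I']), ((['E'], '-'), ['A']), ((['E'], '?'), ['I', 'A']),
   ((['T'], '.'), ['N']), ((['T'], '-'), ['M']), ((['T'], '?'), ['N', 'M']),
   ((['I'], '.'), ['S']), ((['I'], '-'), ['U']), ((['I'], '?'), ['S', 'U']),
   ((['A'], '.'), ['R']), ((['A'], '-'), ['W']), ((['A'], '?'), ['R', 'W']),
   ((['N'], '.'), ['D']), ((['N'], '-'), ['K']), ((['N'], '?'), ['D', 'K']),
   ((['M'], '.'), ['G']), ((['M'], '-'), ['O']), ((['M'], '?'), ['G', 'O'])]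

-- _expand(state, rest): depth-first recursion; a missing TRANS key is a KeyError (excluded by Pre_), here ""
def expandB (state : List Char) (rest : List Char) : List (List Char) :=
  match rest with
  | [] => [state]
  | ch :: rs =>
    ((PySem.Dict.get? transB (state, ch)).getD []).foldr
      (fun nxt out => expandB [nxt] rs ++ out) []

def possibilities_alt (word : String) : List String :=
  if word.toList.length < 1 ∨ word.toList.length > 3 then []
  else (expandB [] word.toList).map String.mk

-- ===== PRECONDITION & SPEC =====
-- Pre_ excludes exactly the inputs on which A raises KeyError: a word of length 1..3
-- containing a character that is not one of the three morse accents.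
def Pre_possibilities (word : String) : Prop :=
  (1 ≤ word.toList.length ∧ word.toList.length ≤ 3) →
    (word.toList.all (fun c => c == '.' || c == '-' || c == '?')) = true
instance (word : String) : Decidable (Pre_possibilities word) := by
  unfold Pre_possibilities; infer_instance
def pvWitness_possibilities : String := ".?-"

def Spec_possibilities (word : String) (out : List String) : Prop := out = possibilities_alt word
instance (word : String) (out : List String) : Decidable (Spec_possibilities word out) := by unfold Spec_possibilities; infer_instance

-- ===== CLAIM (what is proved, stated in full; the proofs are below) =====
def Claim_equal_possibilities : Prop := ∀ (word : String), Dom_possibilities word → Pre_possibilities word → Spec_possibilities word (possibilities word)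

-- ===== LEMMAS AND PROOFS =====

-- the core equivalence: A's branch-per-length body equals B's guarded recursive expansion
theorem possA_eq_alt (cs : List Char)
    (h : (1 ≤ cs.length ∧ cs.length ≤ 3) → ∀ c ∈ cs, c = '.' ∨ c = '-' ∨ c = '?') :
    (possA cs).map String.mk =
      (if cs.length < 1 ∨ cs.length > 3 then []
       else (expandB [] cs).map String.mk) := by
  match cs with
  | [] => decide
  | [a] =>
    have ha := h (by simp) a (by simp)
    rcases ha with rfl | rfl | rfl <;> decide
  | [a, b] =>
    have ha := h (by simp) a (by simp)
    have hb := h (by simp) b (by simp)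
    rcases ha with rfl | rfl | rfl <;> rcases hb with rfl | rfl | rfl <;> decide
  | [a, b, c] =>
    have ha := h (by simp) a (by simp)
    have hb := h (by simp) b (by simp)
    have hc := h (by simp) c (by simp)
    rcases ha with rfl | rfl | rfl <;> rcases hb with rfl | rfl | rfl <;>
      rcases hc with rfl | rfl | rfl <;> decide
  | a :: b :: c :: d :: rest =>
    simp only [possA, List.length_cons]
    have h5 : rest.length + 1 + 1 + 1 + 1 ≠ 2 := by omega
    have h6 : rest.length + 1 + 1 + 1 + 1 ≠ 3 := by omega
    have h7 : rest.length + 1 + 1 + 1 + 1 > 3 := by omega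
    simp [h5, h6, h7]

-- ===== VERDICT (by name: the statement is the Claim_ definition above) =====
theorem possibilities_spec : Claim_equal_possibilities := by
  intro word _ hpre
  unfold Pre_possibilities at hpre
  unfold Spec_possibilities possibilities possibilities_alt
  rw [possA_eq_alt word.toList ?_]
  intro hlen
  have h' := hpre hlen
  simp only [List.all_eq_true, Bool.or_eq_true, beq_iff_eq] at h'
  intro c hc
  exact or_assoc.mp (h' c hc)
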